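-- pv_equiv track=rewrite | github.com/stolena2010-blip/drawingAIALGAT | src/services/extraction/filename_utils.py | _fuzzy_substring_match
-- ===== SOURCE A (Python) =====
-- def _fuzzy_char_equal(c1: str, c2: str) -> bool:
--     """
--     השוואת תווים עם עדינות לבלבול OCR
--     - O == 0 (אות O == מספר 0)
--     - I == 1 (אות I == מספר 1)
--     - i == 1 (אות i קטנה == מספר 1)
--     - l == 1 (אות l קטנה == מספר 1)
--
--     לכל זוג אחר - חייב להיות בדיוק אותו דבר
--     """
--     if c1 == c2:
--         return True
--
--     # זוגות OCR confusion - עדינות שמפלטנו בפי OCR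
--     ocr_pairs = {('O', '0'), ('0', 'O'), ('o', '0'), ('0', 'o'),
--                  ('I', '1'), ('1', 'I'), ('i', '1'), ('1', 'i'),
--                  ('l', '1'), ('1', 'l')}
--
--     if (c1, c2) in ocr_pairs:
--         return True
--
--     return False
--
-- def _fuzzy_substring_match(part_num: str, filename: str, min_length: int = 5) -> bool:
--     """
--     בדיקה אם part_num מופיע בתוך filename עם עדינות לבלבול OCR
--     - חייב להיות לפחות min_length תווים מדוקט חוקיים
--     - כטר תו צריך להיות או בדיוק כמו או אם OCR confusion
--     - אם לא OCR confusion - לא היטבה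
--
--     דוגמאות:
--     - part_num="b044666a", filename="bo44666a"  True (O==0 זוג OCR)
--     - part_num="ui6543i", filename="il6543l"  True (I==1, l==1 זוגי OCR)
--     - part_num="b044666a", filename="b155666a"  False (0!=1, לא זוג OCR)
--     - part_num="b044666a", filename="b255666a"  False (0!=2, לא OCR confusion מוכר)
--     """
--     if len(part_num) < min_length or len(filename) < min_length:
--         return False
--
--     # חפש את part_num בתוך filename עם fuzzy matching
--     for start_idx in range(len(filename) - len(part_num) + 1):
--         match = True
--         for i, c1 in enumerate(part_num):
--             c2 = filename[start_idx + i]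
--             if not _fuzzy_char_equal(c1, c2):
--                 match = False
--                 break
--
--         if match:
--             return True
--
--     return False
-- ===== SOURCE B (Python) =====
-- # Canonicalize both strings (O,o->0; I,i,l->1), let C-level str.find enumerate the
-- # candidate alignments, and verify only the pattern's confusable-letter positions there.
-- _CANON = str.maketrans("OoIil", "00111")
--
-- def _fuzzy_substring_match(part_num: str, filename: str, min_length: int = 5) -> bool:
--     if len(part_num) < min_length or len(filename) < min_length:
--         return False
--     mp = part_num.translate(_CANON)
--     mt = filename.translate(_CANON)
--     letter_pos = [i for i, c in enumerate(part_num) if c in "OoIil"]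
--     s = mt.find(mp)
--     while s != -1:
--         if all(filename[s + i] == part_num[i] or filename[s + i] in "01"
--                for i in letter_pos):
--             return True
--         s = mt.find(mp, s + 1)
--     return False
-- ===== Notes on version B (the rewrite author's own statement) =====
-- stated objective: alternative
-- what changed: Replaces A's nested start-position x character Python scan with a different strategy: canonicalize both strings through the OCR confusion map (O,o->0; I,i,l->1), enumerate candidate alignments with str.find on the canonical strings, and re-verify only the pattern's confusable-letter positions at each candidate.
import Mathlib
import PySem

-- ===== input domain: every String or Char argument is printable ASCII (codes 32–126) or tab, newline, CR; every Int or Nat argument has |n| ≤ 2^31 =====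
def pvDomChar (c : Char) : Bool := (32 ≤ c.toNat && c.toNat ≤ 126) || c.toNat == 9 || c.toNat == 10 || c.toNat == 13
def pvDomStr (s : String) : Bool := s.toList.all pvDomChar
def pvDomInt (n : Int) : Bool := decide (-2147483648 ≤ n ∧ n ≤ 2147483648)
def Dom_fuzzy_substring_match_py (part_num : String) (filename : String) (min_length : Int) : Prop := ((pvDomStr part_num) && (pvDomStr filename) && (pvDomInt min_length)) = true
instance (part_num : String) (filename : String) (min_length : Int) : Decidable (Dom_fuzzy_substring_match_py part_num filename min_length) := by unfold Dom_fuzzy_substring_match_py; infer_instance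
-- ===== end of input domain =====

-- B replaces A's per-start-position Python character scan by: canonicalize both strings
-- through the OCR confusion map (O,o→0; I,i,l→1), enumerate candidate alignments with
-- str.find on the canonical strings, and re-check only the confusable-letter positions.

-- ===== PORT A =====
def fuzzyCharEqual (c1 : Char) (c2 : Char) : Bool :=
  if c1 == c2 then true
  else
    let ocr_pairs : PySem.Set (Char × Char) := PySem.Set.ofList
      [('O','0'), ('0','O'), ('o','0'), ('0','o'),
       ('I','1'), ('1','I'), ('i','1'), ('1','i'),
       ('l','1'), ('1','l')]
    if PySem.Set.contains ocr_pairs (c1, c2) then true else false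

-- inner 'for i, c1 in enumerate(part_num)' loop with its break/match flag;
-- the index start_idx+i is always in range at every call site, so pyGetD is exact there
def fuzzyInner (t : List Char) (s : Int) : List (Int × Char) → Bool
  | [] => true
  | (i, c1) :: rest =>
      let c2 := PySem.List.pyGetD t (s + i) ' '
      if !fuzzyCharEqual c1 c2 then false else fuzzyInner t s rest

def fuzzy_substring_match_py (part_num : String) (filename : String) (min_length : Int) : Bool :=
  let p := part_num.toList
  let t := filename.toList
  if (p.length : Int) < min_length || (t.length : Int) < min_length then false
  else
    (PySem.List.pyRange 0 ((t.length : Int) - (p.length : Int) + 1) 1).any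
      (fun s => fuzzyInner t s (PySem.List.enumerate p 0))

-- ===== PORT B =====
-- str.maketrans("OoIil", "00111") applied to one character
def mapC (c : Char) : Char :=
  if c = 'O' then '0'
  else if c = 'o' then '0'
  else if c = 'I' then '1'
  else if c = 'i' then '1'
  else if c = 'l' then '1'
  else c

-- [i for i, c in enumerate(part_num) if c in "OoIil"]
def letterposOf (p : List Char) : List Int :=
  ((PySem.List.enumerate p 0).filter (fun ic => "OoIil".toList.contains ic.2)).map (fun ic => ic.1)

-- all(filename[s+i] == part_num[i] or filename[s+i] in "01" for i in letter_pos);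
-- every index s+i (and i) is in range at all call sites, so pyGetD is exact there
def verifyOk (p t : List Char) (s : Int) (lp : List Int) : Bool :=
  lp.all (fun i =>
    (PySem.List.pyGetD t (s + i) ' ' == PySem.List.pyGetD p i ' ')
      || "01".toList.contains (PySem.List.pyGetD t (s + i) ' '))

-- the 'while s != -1' loop; the fuel argument only makes the recursion structural and
-- is never exhausted when the loop is entered with fuel = len(mt) + 1
def searchLoop (p t mp mt : List Char) (lp : List Int) : Nat → Int → Bool
  | 0, _ => false
  | fuel + 1, s =>
    if s = -1 then false
    else if verifyOk p t s lp then true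
    else searchLoop p t mp mt lp fuel (PySem.Chars.findFrom mt mp (s + 1))

def fuzzy_substring_match_py_alt (part_num : String) (filename : String) (min_length : Int) : Bool :=
  let p := part_num.toList
  let t := filename.toList
  if (p.length : Int) < min_length || (t.length : Int) < min_length then false
  else
    let mp := p.map mapC
    let mt := t.map mapC
    let lp := letterposOf p
    searchLoop p t mp mt lp (mt.length + 1) (PySem.Chars.find mt mp)

-- ===== PRECONDITION & SPEC =====
def Spec_fuzzy_substring_match_py (part_num : String) (filename : String) (min_length : Int) (out : Bool) : Prop := out = fuzzy_substring_match_py_alt part_num filename min_length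
instance (part_num : String) (filename : String) (min_length : Int) (out : Bool) : Decidable (Spec_fuzzy_substring_match_py part_num filename min_length out) := by unfold Spec_fuzzy_substring_match_py; infer_instance

-- ===== CLAIM (what is proved, stated in full; the proofs are below) =====
def Claim_equal_fuzzy_substring_match_py : Prop := ∀ (part_num : String) (filename : String) (min_length : Int), Dom_fuzzy_substring_match_py part_num filename min_length → Spec_fuzzy_substring_match_py part_num filename min_length (fuzzy_substring_match_py part_num filename min_length)

-- ===== LEMMAS AND PROOFS =====

-- position-by-position fuzzy match of two equal-length windows
def fmatch : List Char → List Char → Bool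
  | [], [] => true
  | a :: as, b :: bs => fuzzyCharEqual a b && fmatch as bs
  | _, _ => false

-- the common specification: p occurs fuzzily inside t
def Occ (p t : List Char) : Prop := ∃ u w v, t = u ++ w ++ v ∧ fmatch p w = true

theorem fmatch_length {x y : List Char} (h : fmatch x y = true) : x.length = y.length := by
  induction x generalizing y with
  | nil => cases y with
    | nil => rfl
    | cons b bs => simp [fmatch] at h
  | cons a as ih =>
    cases y with
    | nil => simp [fmatch] at h
    | cons b bs =>
      simp only [fmatch, Bool.and_eq_true] at h
      simp [ih h.2]

theorem fmatch_iff_forall (x y : List Char) :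
    fmatch x y = true ↔ x.length = y.length ∧
      ∀ (i : Nat) (h1 : i < x.length) (h2 : i < y.length), fuzzyCharEqual x[i] y[i] = true := by
  induction x generalizing y with
  | nil =>
    cases y with
    | nil => simp [fmatch]
    | cons b bs => simp [fmatch]
  | cons a as ih =>
    cases y with
    | nil => simp [fmatch]
    | cons b bs =>
      simp only [fmatch, Bool.and_eq_true, ih, List.length_cons]
      constructor
      · rintro ⟨hab, hlen, hall⟩
        refine ⟨by omega, ?_⟩
        intro i h1 h2
        cases i with
        | zero => simpa using hab
        | succ n => simpa using hall n (by omega) (by omega)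
      · rintro ⟨hlen, hall⟩
        exact ⟨by simpa using hall 0 (by omega) (by omega), by omega,
          fun i h1 h2 => by simpa using hall (i+1) (by omega) (by omega)⟩

theorem fuzzyInner_eq (p t : List Char) (s : Int) (hs : 0 ≤ s) :
    ∀ (k : Int), 0 ≤ k → (s + k).toNat + p.length ≤ t.length →
    fuzzyInner t s (PySem.List.enumerate p k)
      = fmatch p ((t.drop (s + k).toNat).take p.length) := by
  induction p with
  | nil => intro k hk hb; simp [PySem.List.enumerate_nil, fuzzyInner, fmatch]
  | cons c p' ih =>
    intro k hk hb
    rw [PySem.List.enumerate_cons]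
    have hn : (s + k).toNat < t.length := by simp only [List.length_cons] at hb; omega
    have hget : PySem.List.pyGetD t (s + k) ' ' = t[(s + k).toNat] :=
      PySem.List.pyGetD_eq_getElem t ' ' (by omega) (by push_cast; omega)
    simp only [fuzzyInner, hget, List.drop_eq_getElem_cons hn, List.length_cons,
      List.take_succ_cons, fmatch]
    have hb' : (s + (k + 1)).toNat + p'.length ≤ t.length := by
      simp only [List.length_cons] at hb; omega
    rw [ih (k + 1) (by omega) hb']
    have hsk : (s + (k + 1)).toNat = (s + k).toNat + 1 := by omega
    rw [hsk]
    cases hfe : fuzzyCharEqual c t[(s + k).toNat] <;> simp [hfe]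

theorem acore_iff (p t : List Char) :
    ((PySem.List.pyRange 0 ((t.length : Int) - (p.length : Int) + 1) 1).any
      (fun s => fuzzyInner t s (PySem.List.enumerate p 0)) = true) ↔ Occ p t := by
  rw [List.any_eq_true]
  constructor
  · rintro ⟨s, hmem, hinner⟩
    rw [PySem.List.mem_pyRange_one] at hmem
    obtain ⟨hs0, hs1⟩ := hmem
    have hb : (s + 0).toNat + p.length ≤ t.length := by omega
    rw [fuzzyInner_eq p t s hs0 0 le_rfl hb] at hinner
    refine ⟨t.take (s + 0).toNat, (t.drop (s + 0).toNat).take p.length,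
      (t.drop (s + 0).toNat).drop p.length, ?_, hinner⟩
    simp [List.append_assoc, List.take_append_drop]
  · rintro ⟨u, w, v, rfl, hm⟩
    have hlen := fmatch_length hm
    refine ⟨(u.length : Int), ?_, ?_⟩
    · rw [PySem.List.mem_pyRange_one]
      constructor
      · positivity
      · simp only [List.length_append]
        push_cast
        omega
    · have hb : (((u.length : Int)) + 0).toNat + p.length ≤ (u ++ w ++ v).length := by
        simp only [List.length_append]; omega
      rw [fuzzyInner_eq p _ _ (by positivity) 0 le_rfl hb]
      have hn : (((u.length : Int)) + 0).toNat = u.length := by omega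
      rw [hn, List.append_assoc, List.drop_left, hlen, List.take_left]
      exact hm

-- ----- B-side lemmas -----

theorem mapC_eq_zero_iff (c : Char) : mapC c = '0' ↔ c = '0' ∨ c = 'O' ∨ c = 'o' := by
  unfold mapC
  split_ifs <;> simp_all

theorem mapC_eq_one_iff (c : Char) : mapC c = '1' ↔ c = '1' ∨ c = 'I' ∨ c = 'i' ∨ c = 'l' := by
  unfold mapC
  split_ifs <;> simp_all

theorem mapC_eq_of_ne (c x : Char) (h : mapC c = x) (h0 : x ≠ '0') (h1 : x ≠ '1') : c = x := by
  unfold mapC at h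
  split_ifs at h <;>
    first
      | exact absurd h.symm h0
      | exact absurd h.symm h1
      | exact h

theorem fuzzy_mapC {a b : Char} (h : fuzzyCharEqual a b = true) : mapC a = mapC b := by
  unfold fuzzyCharEqual at h
  by_cases hc : (a == b) = true
  · rw [beq_iff_eq] at hc; rw [hc]
  · rw [if_neg hc] at h
    dsimp only at h
    split at h
    · next hcond =>
        have hm : (a, b) ∈ ([('O','0'), ('0','O'), ('o','0'), ('0','o'),
           ('I','1'), ('1','I'), ('i','1'), ('1','i'),
           ('l','1'), ('1','l')] : List (Char × Char)) := by
          simpa [PySem.Set.contains, PySem.Set.ofList, List.contains_eq_mem] using hcond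
        simp only [List.mem_cons, List.not_mem_nil, or_false, Prod.mk.injEq] at hm
        rcases hm with ⟨rfl, rfl⟩|⟨rfl, rfl⟩|⟨rfl, rfl⟩|⟨rfl, rfl⟩|⟨rfl, rfl⟩|⟨rfl, rfl⟩|⟨rfl, rfl⟩|⟨rfl, rfl⟩|⟨rfl, rfl⟩|⟨rfl, rfl⟩ <;> decide
    · exact absurd h (by simp)

theorem charCase (pc tc : Char) (hM : mapC pc = mapC tc) :
    fuzzyCharEqual pc tc
      = (!("OoIil".toList.contains pc) || (tc == pc || "01".toList.contains tc)) := by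
  by_cases h1 : pc = 'O'
  · subst h1
    rcases (mapC_eq_zero_iff tc).mp (by rw [← hM]; decide) with rfl|rfl|rfl <;> decide
  by_cases h2 : pc = 'o'
  · subst h2
    rcases (mapC_eq_zero_iff tc).mp (by rw [← hM]; decide) with rfl|rfl|rfl <;> decide
  by_cases h3 : pc = 'I'
  · subst h3
    rcases (mapC_eq_one_iff tc).mp (by rw [← hM]; decide) with rfl|rfl|rfl|rfl <;> decide
  by_cases h4 : pc = 'i'
  · subst h4
    rcases (mapC_eq_one_iff tc).mp (by rw [← hM]; decide) with rfl|rfl|rfl|rfl <;> decide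
  by_cases h5 : pc = 'l'
  · subst h5
    rcases (mapC_eq_one_iff tc).mp (by rw [← hM]; decide) with rfl|rfl|rfl|rfl <;> decide
  by_cases h6 : pc = '0'
  · subst h6
    rcases (mapC_eq_zero_iff tc).mp (by rw [← hM]; decide) with rfl|rfl|rfl <;> decide
  by_cases h7 : pc = '1'
  · subst h7
    rcases (mapC_eq_one_iff tc).mp (by rw [← hM]; decide) with rfl|rfl|rfl|rfl <;> decide
  · have hself : mapC pc = pc := by unfold mapC; simp [h1, h2, h3, h4, h5, h6, h7]
    have htc : tc = pc := mapC_eq_of_ne tc pc (by rw [← hM, hself]) h6 h7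
    subst htc
    have hcont : ("OoIil".toList.contains tc) = false := by
      simp only [List.contains_eq_mem, decide_eq_false_iff_not]
      intro hmem
      simp only [show "OoIil".toList = ['O','o','I','i','l'] from rfl, List.mem_cons,
        List.not_mem_nil, or_false] at hmem
      rcases hmem with rfl|rfl|rfl|rfl|rfl
      · exact h1 rfl
      · exact h2 rfl
      · exact h3 rfl
      · exact h4 rfl
      · exact h5 rfl
    simp [fuzzyCharEqual, hcont]

theorem occ_iff (p t : List Char) (k : Nat) :
    ((p.map mapC) <+: ((t.map mapC).drop k))
      ↔ p.map mapC = ((t.drop k).take p.length).map mapC := by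
  rw [List.prefix_iff_eq_take, List.length_map, ← List.map_drop, ← List.map_take]

theorem window_length (p t : List Char) (k : Nat) (h : k + p.length ≤ t.length) :
    ((t.drop k).take p.length).length = p.length := by
  simp only [List.length_take, List.length_drop]
  omega

theorem prefix_of_fmatch (p t : List Char) (k : Nat) (hb : k + p.length ≤ t.length)
    (hf : fmatch p ((t.drop k).take p.length) = true) :
    (p.map mapC) <+: ((t.map mapC).drop k) := by
  rw [occ_iff]
  obtain ⟨hlen, hall⟩ := (fmatch_iff_forall _ _).mp hf
  apply List.ext_getElem (by simpa using hlen)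
  intro i h1 h2
  simp only [List.getElem_map]
  have h1' : i < p.length := by simpa using h1
  exact fuzzy_mapC (hall i h1' (by omega))

theorem mem_letterposOf (p : List Char) (i : Int) :
    i ∈ letterposOf p ↔ ∃ (j : Nat) (hj : j < p.length),
      i = (j : Int) ∧ ("OoIil".toList.contains p[j]) = true := by
  unfold letterposOf
  simp only [List.mem_map, List.mem_filter, PySem.List.mem_enumerate_iff]
  constructor
  · rintro ⟨ic, ⟨⟨j, hj, rfl⟩, hc⟩, rfl⟩
    exact ⟨j, hj, by simp, hc⟩
  · rintro ⟨j, hj, rfl, hc⟩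
    exact ⟨((0 : Int) + j, p[j]), ⟨⟨j, hj, rfl⟩, hc⟩, by simp⟩

theorem verify_eq_fmatch (p t : List Char) (sn : Nat) (hsn : sn ≤ t.length)
    (hocc : (p.map mapC) <+: ((t.map mapC).drop sn)) :
    verifyOk p t (sn : Int) (letterposOf p) = fmatch p ((t.drop sn).take p.length) := by
  have hmeq : p.map mapC = ((t.drop sn).take p.length).map mapC := (occ_iff p t sn).mp hocc
  have hbound : sn + p.length ≤ t.length := by
    have hl := hocc.length_le
    simp only [List.length_map, List.length_drop] at hl
    omega
  have hwlen : ((t.drop sn).take p.length).length = p.length :=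
    window_length p t sn hbound
  have hwin : ∀ (j : Nat) (hj : j < p.length),
      ((t.drop sn).take p.length)[j]'(by omega) = t[sn + j]'(by omega) := by
    intro j hj
    rw [List.getElem_take, List.getElem_drop]
  have hpt : ∀ (j : Nat) (hj : j < p.length), mapC p[j] = mapC (t[sn + j]'(by omega)) := by
    intro j hj
    have h2 := List.getElem_of_eq hmeq (by simpa using hj)
    simp only [List.getElem_map] at h2
    rw [h2, hwin j hj]
  rw [Bool.eq_iff_iff]
  unfold verifyOk
  rw [List.all_eq_true, fmatch_iff_forall]
  constructor
  · intro hall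
    refine ⟨hwlen.symm, ?_⟩
    intro j h1 h2
    rw [hwin j h1, charCase p[j] _ (hpt j h1)]
    by_cases hc : ("OoIil".toList.contains p[j]) = true
    · have hcond := hall (j : Int) ((mem_letterposOf p (j : Int)).mpr ⟨j, h1, rfl, hc⟩)
      have hgt : PySem.List.pyGetD t ((sn : Int) + (j : Int)) ' ' = t[sn + j]'(by omega) := by
        rw [show ((sn : Int) + (j : Int)) = ((sn + j : Nat) : Int) by push_cast; ring]
        exact PySem.List.pyGetD_eq_getElem t ' ' (by omega) (by push_cast; omega)
      have hgp : PySem.List.pyGetD p ((j : Nat) : Int) ' ' = p[j] :=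
        PySem.List.pyGetD_eq_getElem p ' ' (by omega) (by push_cast; omega)
      rw [hgt, hgp] at hcond
      simp only [hc, Bool.not_true, Bool.false_or]
      exact hcond
    · simp only [Bool.not_eq_true] at hc
      have hc2 := hc
      rw [show "OoIil".toList = ['O','o','I','i','l'] from rfl] at hc2
      simp only [List.contains_eq_mem, decide_eq_false_iff_not, List.mem_cons,
        List.not_mem_nil, or_false] at hc2
      push_neg at hc2
      simp only [Bool.or_eq_true, Bool.not_eq_true']
      left
      simpa using hc2
  · rintro ⟨_, hall⟩
    intro i hi
    obtain ⟨j, hj, rfl, hc⟩ := (mem_letterposOf p i).mp hi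
    have hfe := hall j hj (by omega)
    rw [hwin j hj, charCase p[j] _ (hpt j hj), hc] at hfe
    have hgt : PySem.List.pyGetD t ((sn : Int) + (j : Int)) ' ' = t[sn + j]'(by omega) := by
      rw [show ((sn : Int) + (j : Int)) = ((sn + j : Nat) : Int) by push_cast; ring]
      exact PySem.List.pyGetD_eq_getElem t ' ' (by omega) (by push_cast; omega)
    have hgp : PySem.List.pyGetD p ((j : Nat) : Int) ' ' = p[j] :=
      PySem.List.pyGetD_eq_getElem p ' ' (by omega) (by push_cast; omega)
    rw [hgt, hgp]
    simpa using hfe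

theorem searchMain (p t : List Char) :
    ∀ (fuel b : Nat), t.length + 1 - b ≤ fuel → b ≤ t.length →
    (searchLoop p t (p.map mapC) (t.map mapC) (letterposOf p) fuel
        (PySem.Chars.findFrom (t.map mapC) (p.map mapC) (b : Int)) = true
      ↔ ∃ k : Nat, b ≤ k ∧ k + p.length ≤ t.length
          ∧ fmatch p ((t.drop k).take p.length) = true) := by
  intro fuel
  induction fuel with
  | zero => intro b hfuel hb; omega
  | succ fuel ih =>
    intro b hfuel hb
    have hbmt : b ≤ (t.map mapC).length := by simpa using hb
    rw [PySem.Chars.findFrom_natCast _ _ b hbmt]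
    have hfge : -1 ≤ PySem.Chars.find ((t.map mapC).drop b) (p.map mapC) :=
      PySem.Chars.neg_one_le_find _ _
    by_cases hf : PySem.Chars.find ((t.map mapC).drop b) (p.map mapC) = -1
    · rw [if_pos hf]
      have hls : searchLoop p t (p.map mapC) (t.map mapC) (letterposOf p) (fuel+1) (-1) = false := by
        simp [searchLoop]
      rw [hls]
      constructor
      · intro hcontra; simp at hcontra
      rintro ⟨k, hbk, hkn, hfm⟩
      exfalso
      have hpre := prefix_of_fmatch p t k hkn hfm
      have hdd : (t.map mapC).drop k = ((t.map mapC).drop b).drop (k - b) := by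
        rw [List.drop_drop]
        congr 1
        omega
      rw [hdd] at hpre
      have hnin : ¬ (p.map mapC) <:+: ((t.map mapC).drop b) :=
        (PySem.Chars.find_eq_neg_one_iff _ _).mp hf
      have hisin : PySem.Chars.isIn (p.map mapC) ((t.map mapC).drop b) = true :=
        (PySem.Chars.exists_prefix_drop_iff_isIn _ _).mp ⟨k - b, hpre⟩
      exact hnin ((PySem.Chars.isIn_iff_infix _ _).mp hisin)
    · have hf0 : 0 ≤ PySem.Chars.find ((t.map mapC).drop b) (p.map mapC) := by omega
      obtain ⟨hocc0, hmin⟩ := PySem.Chars.find_spec hf0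
      rw [if_neg hf]
      set f := PySem.Chars.find ((t.map mapC).drop b) (p.map mapC) with hfdef
      set k0 : Nat := b + f.toNat with hk0
      have hfle : f ≤ (((t.map mapC).drop b).length : Int) := PySem.Chars.find_le_length _ _
      have hk0n : k0 ≤ t.length := by
        simp only [List.length_drop, List.length_map] at hfle
        omega
      have hocc : (p.map mapC) <+: ((t.map mapC).drop k0) := by
        have hdd : ((t.map mapC).drop b).drop f.toNat = (t.map mapC).drop k0 := by
          rw [List.drop_drop]
        rw [← hdd]
        exact hocc0
      have hkbound : k0 + p.length ≤ t.length := by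
        have hl := hocc.length_le
        simp only [List.length_map, List.length_drop] at hl
        omega
      have hsint : ((b : Int) + f) = ((k0 : Nat) : Int) := by
        push_cast
        omega
      simp only [searchLoop]
      rw [if_neg (by omega)]
      have hver : verifyOk p t ((b : Int) + f) (letterposOf p)
          = fmatch p ((t.drop k0).take p.length) := by
        rw [hsint]
        exact verify_eq_fmatch p t k0 hk0n hocc
      by_cases hv : fmatch p ((t.drop k0).take p.length) = true
      · rw [hver, hv, if_pos rfl]
        exact ⟨fun _ => ⟨k0, by omega, hkbound, hv⟩, fun _ => rfl⟩
      · have hvf : fmatch p ((t.drop k0).take p.length) = false := by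
          revert hv
          cases fmatch p ((t.drop k0).take p.length) <;> simp
        rw [hver, hvf, if_neg (by simp)]
        have hm1 : 1 ≤ p.length := by
          by_contra hple
          have hp0 : p = [] := by
            cases p with
            | nil => rfl
            | cons a as => simp at hple
          rw [hp0] at hvf
          simp [fmatch] at hvf
        have hstep : ((b : Int) + f + 1) = (((k0 + 1 : Nat)) : Int) := by
          push_cast
          omega
        rw [hstep, ih (k0 + 1) (by omega) (by omega)]
        constructor
        · rintro ⟨k, hk1, hk2, hk3⟩
          exact ⟨k, by omega, hk2, hk3⟩
        · rintro ⟨k, hk1, hk2, hk3⟩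
          rcases lt_trichotomy k k0 with hlt|heq|hgt
          · exfalso
            have hpre := prefix_of_fmatch p t k hk2 hk3
            have hdd : (t.map mapC).drop k = ((t.map mapC).drop b).drop (k - b) := by
              rw [List.drop_drop]
              congr 1
              omega
            rw [hdd] at hpre
            exact hmin (k - b) (by omega) hpre
          · exfalso
            rw [heq] at hk3
            rw [hk3] at hvf
            simp at hvf
          · exact ⟨k, by omega, hk2, hk3⟩

theorem exists_iff_Occ (p t : List Char) :
    (∃ k : Nat, k + p.length ≤ t.length ∧ fmatch p ((t.drop k).take p.length) = true)
      ↔ Occ p t := by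
  constructor
  · rintro ⟨k, hk, hfm⟩
    refine ⟨t.take k, (t.drop k).take p.length, (t.drop k).drop p.length, ?_, hfm⟩
    simp [List.append_assoc, List.take_append_drop]
  · rintro ⟨u, w, v, rfl, hm⟩
    have hlen := fmatch_length hm
    refine ⟨u.length, by simp only [List.length_append]; omega, ?_⟩
    rw [List.append_assoc, List.drop_left, hlen, List.take_left]
    exact hm

theorem bcore_iff (p t : List Char) :
    (searchLoop p t (p.map mapC) (t.map mapC) (letterposOf p)
        ((t.map mapC).length + 1) (PySem.Chars.find (t.map mapC) (p.map mapC)) = true)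
      ↔ Occ p t := by
  rw [← PySem.Chars.findFrom_zero]
  have hcast : ((0 : Nat) : Int) = (0 : Int) := by norm_num
  rw [← hcast, searchMain p t ((t.map mapC).length + 1) 0 (by simp) (by omega),
    ← exists_iff_Occ]
  constructor
  · rintro ⟨k, _, hk2, hk3⟩
    exact ⟨k, hk2, hk3⟩
  · rintro ⟨k, hk2, hk3⟩
    exact ⟨k, by omega, hk2, hk3⟩

-- ===== VERDICT (by name: the statement is the Claim_ definition above) =====
theorem fuzzy_substring_match_py_spec : Claim_equal_fuzzy_substring_match_py := by
  intro part_num filename min_length _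
  unfold Spec_fuzzy_substring_match_py fuzzy_substring_match_py fuzzy_substring_match_py_alt
  dsimp only
  split_ifs with hg
  · rfl
  · rw [Bool.eq_iff_iff, acore_iff, bcore_iff]
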